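-- pv_equiv track=rewrite | github.com/k1monfared/notes | blog/files/20251201/mathematical_calculation.py | count_rolls_with_sum
-- ===== SOURCE A (Python) =====
-- from itertools import product
--
-- def count_rolls_with_sum(target_sum):
--     """
--     Count rolls where at least one of the 3 pairings can make target_sum.
--
--     For a pairing to make target_sum, at least one of its two pairs must sum to target_sum.
--     We need: at least one pair (a,b) where a+b = target_sum
--     """
--     count = 0
--     for roll in product(range(1, 7), repeat=4):
--         d1, d2, d3, d4 = roll
--
--         # Check all three pairings
--         pairings = [
--             [(d1, d2), (d3, d4)],
--             [(d1, d3), (d2, d4)],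
--             [(d1, d4), (d2, d3)]
--         ]
--
--         # If ANY pairing has the target sum, count this roll
--         for pairing in pairings:
--             if any(sum(pair) == target_sum for pair in pairing):
--                 count += 1
--                 break
--
--     return count
-- ===== SOURCE B (Python) =====
-- def count_rolls_with_sum(target_sum):
--     # Complement counting: total rolls minus rolls in which no pair of dice
--     # sums to target_sum; the bad rolls are counted recursively, adding one
--     # die at a time and requiring its complement not to be among earlier dice.
--     def no_pair(pos, seen):
--         if pos == 4:
--             return 1
--         total = 0
--         for d in range(1, 7):
--             if (target_sum - d) not in seen:
--                 total += no_pair(pos + 1, seen | {d})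
--         return total
--     return 6 ** 4 - no_pair(0, frozenset())
-- ===== Notes on version B (the rewrite author's own statement) =====
-- stated objective: alternative
-- what changed: A scans every four-dice roll and tests all six pair-sums per roll; B counts by complement, recursively building only the rolls in which no die's complement target_sum - d appears among earlier dice and subtracting that count from the total number of rolls.
import Mathlib
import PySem

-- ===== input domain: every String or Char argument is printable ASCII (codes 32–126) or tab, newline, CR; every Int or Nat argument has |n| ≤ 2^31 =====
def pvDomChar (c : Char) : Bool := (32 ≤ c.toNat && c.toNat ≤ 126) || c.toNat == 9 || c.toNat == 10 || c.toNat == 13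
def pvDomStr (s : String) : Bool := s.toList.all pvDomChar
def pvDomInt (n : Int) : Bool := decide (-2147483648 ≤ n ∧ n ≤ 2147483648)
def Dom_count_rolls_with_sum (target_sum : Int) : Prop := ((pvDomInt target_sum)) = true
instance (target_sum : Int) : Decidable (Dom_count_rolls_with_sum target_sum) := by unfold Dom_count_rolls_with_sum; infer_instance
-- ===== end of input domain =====

-- B replaces A's scan of all 1296 rolls with six pair checks each by complement
-- counting: total rolls minus rolls with no pair summing to target, counted
-- recursively one die at a time ("simpler" in reading, not claimed faster).

-- ===== PORT A =====
-- product(range(1,7), repeat=4) as a list of quadruples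
def pvQuadsA : List (Int × Int × Int × Int) :=
  (PySem.List.pyRange 1 7 1).flatMap (fun d1 =>
    (PySem.List.pyRange 1 7 1).flatMap (fun d2 =>
      (PySem.List.pyRange 1 7 1).flatMap (fun d3 =>
        (PySem.List.pyRange 1 7 1).map (fun d4 => (d1, d2, d3, d4)))))

def count_rolls_with_sum (target_sum : Int) : Int :=
  pvQuadsA.foldl
    (fun count roll =>
      let d1 := roll.1; let d2 := roll.2.1; let d3 := roll.2.2.1; let d4 := roll.2.2.2
      let pairings : List (List (Int × Int)) :=
        [[(d1, d2), (d3, d4)], [(d1, d3), (d2, d4)], [(d1, d4), (d2, d3)]]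
      -- 'for pairing in pairings: if any(sum(pair)==target): count += 1; break'
      if pairings.any (fun pairing => pairing.any (fun p => p.1 + p.2 == target_sum)) then
        count + 1
      else count)
    0

-- ===== PORT B =====
-- no_pair(pos, seen): recursion on the number of dice still to place (4 - pos)
def pvNoPair (target_sum : Int) : Nat → PySem.Set Int → Int
  | 0, _ => 1
  | k + 1, seen =>
      (PySem.List.pyRange 1 7 1).foldl
        (fun total d =>
          if PySem.Set.contains seen (target_sum - d) then total
          else total + pvNoPair target_sum k (PySem.Set.add seen d))
        0

def count_rolls_with_sum_alt (target_sum : Int) : Int :=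
  6 ^ 4 - pvNoPair target_sum 4 PySem.Set.empty

-- ===== PRECONDITION & SPEC =====
def Spec_count_rolls_with_sum (target_sum : Int) (out : Int) : Prop := out = count_rolls_with_sum_alt target_sum
instance (target_sum : Int) (out : Int) : Decidable (Spec_count_rolls_with_sum target_sum out) := by unfold Spec_count_rolls_with_sum; infer_instance

-- ===== CLAIM (what is proved, stated in full; the proofs are below) =====
def Claim_equal_count_rolls_with_sum : Prop := ∀ (target_sum : Int), Dom_count_rolls_with_sum target_sum → Spec_count_rolls_with_sum target_sum (count_rolls_with_sum target_sum)

-- ===== LEMMAS AND PROOFS =====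

theorem pvRange16 : PySem.List.pyRange 1 7 1 = [1, 2, 3, 4, 5, 6] := by decide

-- Out-of-range target: every check in A is false, so A returns 0.
theorem pvA_out (t : Int) (ht : t ≤ 1 ∨ 13 ≤ t) : count_rolls_with_sum t = 0 := by
  unfold count_rolls_with_sum
  rw [PySem.List.foldl_congr_mem (g := fun (count : Int) (_ : Int × Int × Int × Int) => count)]
  · exact List.foldl_fixed _
  · intro acc roll hmem
    simp only [pvQuadsA, List.mem_flatMap, List.mem_map, PySem.List.mem_pyRange_one] at hmem
    obtain ⟨d1, ⟨h1a, h1b⟩, d2, ⟨h2a, h2b⟩, d3, ⟨h3a, h3b⟩, d4, ⟨h4a, h4b⟩, rfl⟩ := hmem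
    simp only [List.any_cons, List.any_nil, Bool.or_false]
    rw [if_neg]
    simp only [Bool.or_eq_true, beq_iff_eq]
    omega

-- Out-of-range target: no complement is ever seen, so no_pair counts everything.
theorem pvNoPair_out (t : Int) (ht : t ≤ 1 ∨ 13 ≤ t) :
    ∀ (k : Nat) (seen : PySem.Set Int), (∀ x ∈ seen, 1 ≤ x ∧ x ≤ 6) →
      pvNoPair t k seen = 6 ^ k := by
  intro k
  induction k with
  | zero => intro seen _; rfl
  | succ k ih =>
    intro seen hseen
    have hc : ∀ d : Int, 1 ≤ d → d ≤ 6 → PySem.Set.contains seen (t - d) = false := by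
      intro d hd1 hd2
      by_contra h
      have : PySem.Set.contains seen (t - d) = true := by
        cases hcc : PySem.Set.contains seen (t - d) with
        | false => exact absurd hcc h
        | true => rfl
      have := (PySem.Set.contains_iff _ _).mp this
      have := hseen _ this
      omega
    have hadd : ∀ d : Int, 1 ≤ d → d ≤ 6 →
        pvNoPair t k (PySem.Set.add seen d) = 6 ^ k := by
      intro d hd1 hd2
      apply ih
      intro x hx
      simp only [PySem.Set.mem_add] at hx
      rcases hx with h | h
      · exact hseen _ h
      · subst h; omega
    show (PySem.List.pyRange 1 7 1).foldl _ 0 = _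
    rw [pvRange16]
    simp only [List.foldl_cons, List.foldl_nil,
      hc 1 (by norm_num) (by norm_num), hc 2 (by norm_num) (by norm_num),
      hc 3 (by norm_num) (by norm_num), hc 4 (by norm_num) (by norm_num),
      hc 5 (by norm_num) (by norm_num), hc 6 (by norm_num) (by norm_num),
      Bool.false_eq_true, if_false,
      hadd 1 (by norm_num) (by norm_num), hadd 2 (by norm_num) (by norm_num),
      hadd 3 (by norm_num) (by norm_num), hadd 4 (by norm_num) (by norm_num),
      hadd 5 (by norm_num) (by norm_num), hadd 6 (by norm_num) (by norm_num)]
    ring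

-- ===== VERDICT (by name: the statement is the Claim_ definition above) =====
set_option maxRecDepth 100000 in
set_option maxHeartbeats 4000000 in
theorem count_rolls_with_sum_spec : Claim_equal_count_rolls_with_sum := by
  intro t _
  unfold Spec_count_rolls_with_sum
  by_cases h : 2 ≤ t ∧ t ≤ 12
  · obtain ⟨h1, h2⟩ := h
    interval_cases t <;> decide
  · have ht : t ≤ 1 ∨ 13 ≤ t := by omega
    rw [pvA_out t ht]
    unfold count_rolls_with_sum_alt
    rw [pvNoPair_out t ht 4 PySem.Set.empty (by intro x hx; cases hx)]
    norm_num
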